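-- pv_equiv track=rewrite | github.com/pypi-data/pypi-mirror-383 | packages/dexpi.specificator/dexpi_specificator-1.0.0rc15-py3-none-any.whl/dexpi/specificator/dsl_reader.py | cap_to_camel_case
-- ===== SOURCE A (Python) =====
-- def cap_to_camel_case(cap_case: str):
--     parts: list[str] = []
--     cap = True
--     for char in cap_case:
--         if char.strip():
--             if not cap:
--                 char = char.lower()
--             else:
--                 cap = False
--             parts.append(char)
--         else:
--             cap = True
--     return ''.join(parts)
-- ===== SOURCE B (Python) =====
-- def cap_to_camel_case(cap_case: str):
--     return ''.join(w[:1] + w[1:].lower() for w in cap_case.split())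
-- ===== Notes on version B (the rewrite author's own statement) =====
-- stated objective: idiomatic
-- what changed: Replaces A's character-by-character loop with an explicit cap state flag by a split()-then-join word-level decomposition: each whitespace-separated word keeps its first character and lowercases the rest.
import Mathlib
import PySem

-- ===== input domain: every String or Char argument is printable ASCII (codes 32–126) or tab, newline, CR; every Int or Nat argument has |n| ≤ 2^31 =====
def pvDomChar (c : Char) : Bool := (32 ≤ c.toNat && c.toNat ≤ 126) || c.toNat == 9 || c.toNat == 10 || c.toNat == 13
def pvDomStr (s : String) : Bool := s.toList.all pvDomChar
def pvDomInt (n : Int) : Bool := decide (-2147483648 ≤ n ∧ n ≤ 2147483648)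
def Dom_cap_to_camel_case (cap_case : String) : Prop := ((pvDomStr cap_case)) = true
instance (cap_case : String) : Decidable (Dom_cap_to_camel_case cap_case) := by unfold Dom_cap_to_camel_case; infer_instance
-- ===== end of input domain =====

-- B replaces A's character loop with a cap flag by an idiomatic split()-then-join word-level decomposition.


-- ===== PORT A =====
-- literal transliteration: fold over the characters with state (parts, cap);
-- `if char.strip():` is `(Chars.strip [char]).isEmpty = false`, `char.lower()` is `lowerChar`,
-- `''.join(parts)` over one-char parts is `String.ofList`.
def cap_to_camel_case (cap_case : String) : String :=
  let st := cap_case.toList.foldl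
    (fun (st : List Char × Bool) char =>
      if (PySem.Chars.strip [char]).isEmpty = false then
        if st.2 = false then (st.1 ++ [PySem.Chars.lowerChar char], st.2)
        else (st.1 ++ [char], false)
      else (st.1, true))
    ([], true)
  String.ofList st.1

-- ===== PORT B =====
-- literal transliteration of Source B: ''.join(w[:1] + w[1:].lower() for w in cap_case.split())
def cap_to_camel_case_alt (cap_case : String) : String :=
  PySem.Str.join "" ((PySem.Str.split₀ cap_case).map
    (fun w => PySem.Str.slice w none (some 1) ++ PySem.Str.lower (PySem.Str.slice w (some 1) none)))

-- ===== PRECONDITION & SPEC =====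
def Spec_cap_to_camel_case (cap_case : String) (out : String) : Prop := out = cap_to_camel_case_alt cap_case
instance (cap_case : String) (out : String) : Decidable (Spec_cap_to_camel_case cap_case out) := by unfold Spec_cap_to_camel_case; infer_instance

-- ===== CLAIM (what is proved, stated in full; the proofs are below) =====
def Claim_equal_cap_to_camel_case : Prop := ∀ (cap_case : String), Dom_cap_to_camel_case cap_case → Spec_cap_to_camel_case cap_case (cap_to_camel_case cap_case)

-- ===== LEMMAS AND PROOFS =====

-- common specification of both programs
def camelSpec : Bool → List Char → List Char
  | _, [] => []
  | cap, c :: cs =>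
    if PySem.Chars.isspace c then camelSpec true cs
    else (if cap then c else PySem.Chars.lowerChar c) :: camelSpec false cs

-- the per-word transformation B applies, on the list side
def wordTr (w : List Char) : List Char :=
  PySem.List.slice w none (some 1) ++ PySem.Chars.lower (PySem.List.slice w (some 1) none)

theorem strip_singleton_isEmpty (c : Char) :
    (PySem.Chars.strip [c]).isEmpty = PySem.Chars.isspace c := by
  by_cases h : PySem.Chars.isspace c = true <;>
    simp [PySem.Chars.strip, PySem.Chars.lstrip, PySem.Chars.rstrip, List.dropWhile, h]

theorem join_nil_eq_flatten (xs : List (List Char)) :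
    PySem.Chars.join [] xs = xs.flatten := by
  induction xs with
  | nil => simp [PySem.Chars.join_nil]
  | cons a t ih =>
    cases t with
    | nil => simp [PySem.Chars.join_singleton]
    | cons b r => simpa [PySem.Chars.join_cons_cons] using ih

theorem wordTr_cons (h : Char) (t : List Char) :
    wordTr (h :: t) = h :: PySem.Chars.lower t := by
  have h1 : PySem.List.slice (h :: t) none (some (1:Int)) = List.take 1 (h :: t) :=
    PySem.List.slice_to _ (by norm_num)
  have h2 : PySem.List.slice (h :: t) (some (1:Int)) none = List.drop 1 (h :: t) :=
    PySem.List.slice_from _ (by norm_num)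
  simp [wordTr, h1, h2]

-- invariant for split₀'s accumulator loop, composed with wordTr and join
theorem go_inv (cs : List Char) : ∀ (cur : List Char) (acc : List (List Char)),
    ((PySem.Chars.split₀.go cs cur acc).map wordTr).flatten =
      (acc.reverse.map wordTr).flatten ++
        (match cur.reverse with
         | [] => camelSpec true cs
         | h :: t => h :: PySem.Chars.lower t ++ camelSpec false cs) := by
  induction cs with
  | nil =>
    intro cur acc
    cases hc : cur.reverse with
    | nil =>
      have : cur = [] := by simpa using congrArg List.reverse hc
      simp [PySem.Chars.split₀.go, this, camelSpec]
    | cons h t =>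
      have hne : cur.isEmpty = false := by
        cases cur with
        | nil => simp at hc
        | cons _ _ => rfl
      simp [PySem.Chars.split₀.go, hne, hc, wordTr_cons, camelSpec]
  | cons c rest ih =>
    intro cur acc
    by_cases hs : PySem.Chars.isspace c = true
    · cases hc : cur.reverse with
      | nil =>
        have : cur = [] := by simpa using congrArg List.reverse hc
        simp [PySem.Chars.split₀.go, this, hs, ih, camelSpec]
      | cons h t =>
        have hne : cur.isEmpty = false := by
          cases cur with
          | nil => simp at hc
          | cons _ _ => rfl
        simp [PySem.Chars.split₀.go, hs, hne, ih, hc, wordTr_cons, camelSpec]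
    · have hs' : PySem.Chars.isspace c = false := by simpa using hs
      cases hc : cur.reverse with
      | nil =>
        have : cur = [] := by simpa using congrArg List.reverse hc
        simp [PySem.Chars.split₀.go, this, hs', ih, camelSpec, PySem.Chars.lower]
      | cons h t =>
        have hrc : (c :: cur).reverse = h :: (t ++ [c]) := by simp [hc]
        simp [PySem.Chars.split₀.go, hs', ih, hrc, camelSpec, PySem.Chars.lower]

theorem alt_eq_camelSpec (cs : List Char) :
    ((PySem.Chars.split₀ cs).map wordTr).flatten = camelSpec true cs := by
  simpa using go_inv cs [] []

-- the step function of A's fold, named for the proofs (definitionally the port's lambda)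
def stepA (st : List Char × Bool) (char : Char) : List Char × Bool :=
  if (PySem.Chars.strip [char]).isEmpty = false then
    if st.2 = false then (st.1 ++ [PySem.Chars.lowerChar char], st.2)
    else (st.1 ++ [char], false)
  else (st.1, true)

theorem foldA_eq (cs : List Char) : ∀ (parts : List Char) (cap : Bool),
    (cs.foldl stepA (parts, cap)).1 = parts ++ camelSpec cap cs := by
  induction cs with
  | nil => intro parts cap; simp [camelSpec]
  | cons c rest ih =>
    intro parts cap
    by_cases hs : PySem.Chars.isspace c = true
    · have hstep : stepA (parts, cap) c = (parts, true) := by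
        simp [stepA, strip_singleton_isEmpty, hs]
      rw [List.foldl_cons, hstep, ih]
      simp [camelSpec, hs]
    · have hs' : PySem.Chars.isspace c = false := by simpa using hs
      cases cap with
      | false =>
        have hstep : stepA (parts, false) c = (parts ++ [PySem.Chars.lowerChar c], false) := by
          simp [stepA, strip_singleton_isEmpty, hs']
        rw [List.foldl_cons, hstep, ih]
        simp [camelSpec, hs']
      | true =>
        have hstep : stepA (parts, true) c = (parts ++ [c], false) := by
          simp [stepA, strip_singleton_isEmpty, hs']
        rw [List.foldl_cons, hstep, ih]
        simp [camelSpec, hs']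

-- ===== VERDICT (by name: the statement is the Claim_ definition above) =====
theorem cap_to_camel_case_spec : Claim_equal_cap_to_camel_case := by
  intro s _
  unfold Spec_cap_to_camel_case
  apply String.toList_inj.mp
  have hA : (cap_to_camel_case s).toList = camelSpec true s.toList := by
    show (String.ofList (List.foldl stepA ([], true) s.toList).1).toList = _
    rw [foldA_eq]; simp
  have hB : (cap_to_camel_case_alt s).toList = camelSpec true s.toList := by
    unfold cap_to_camel_case_alt
    rw [PySem.Str.toList_join]
    rw [show ((PySem.Str.split₀ s).map
        (fun w => PySem.Str.slice w none (some 1) ++ PySem.Str.lower (PySem.Str.slice w (some 1) none))).map String.toList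
        = (PySem.Chars.split₀ s.toList).map wordTr by
      rw [← PySem.Str.split₀_map_toList s, List.map_map, List.map_map]
      refine List.map_congr_left ?_
      intro w _
      simp [wordTr, PySem.Str.toList_slice, PySem.Str.toList_lower]]
    rw [show ("" : String).toList = [] from rfl, join_nil_eq_flatten, alt_eq_camelSpec]
  rw [hA, hB]
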